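-- pv_equiv track=rewrite | github.com/pypi-data/pypi-mirror-104 | packages/eeyore-nlp/eeyore-nlp-0.0.1.tar.gz/eeyore-nlp-0.0.1/src/eeyore_nlp/pipelines/context_pipes.py | _get_end_positions
-- ===== SOURCE A (Python) =====
-- from typing import List
--
-- def _get_end_positions(
--                        tokens: List[str],
--                        spacings: List[str]) -> List[str]:
--     end = len(tokens[0]) - 1
--     end_position = [str(end)]
--     for i in range(1, len(tokens)):
--         if spacings[i-1] == 'yes':
--             # move forward
--             end += 1
--
--         end += len(tokens[i])
--         end_position.append(str(end))
--
--     return end_position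
-- ===== SOURCE B (Python) =====
-- def _get_end_positions(tokens, spacings):
--     return [str(sum(map(len, tokens[:i + 1])) + spacings[:i].count('yes') - 1)
--             for i in range(len(tokens))]
-- ===== Notes on version B (the rewrite author's own statement) =====
-- stated objective: alternative
-- what changed: Replaces A's single fused running-accumulator loop by a stateless per-index closed form: each end position is recomputed independently as sum(map(len, tokens[:i+1])) + spacings[:i].count('yes') - 1, trading A's O(n) running sum for an O(n^2) slice-and-count formula with no carried state.
import Mathlib
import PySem

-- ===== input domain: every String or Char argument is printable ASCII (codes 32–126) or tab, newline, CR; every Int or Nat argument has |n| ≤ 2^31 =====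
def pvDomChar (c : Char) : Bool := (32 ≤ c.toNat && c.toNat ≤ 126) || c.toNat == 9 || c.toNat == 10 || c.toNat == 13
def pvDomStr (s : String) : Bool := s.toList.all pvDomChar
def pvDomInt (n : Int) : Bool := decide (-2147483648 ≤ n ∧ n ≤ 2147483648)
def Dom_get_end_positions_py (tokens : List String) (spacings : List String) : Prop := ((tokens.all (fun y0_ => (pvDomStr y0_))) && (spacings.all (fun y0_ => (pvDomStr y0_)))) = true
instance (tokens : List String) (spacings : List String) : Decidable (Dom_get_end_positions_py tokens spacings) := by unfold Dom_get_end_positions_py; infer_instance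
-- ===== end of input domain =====

-- B replaces A's fused running-accumulator loop by a stateless per-index slice-and-count closed form; alternative decomposition, not faster (O(n^2) vs O(n)).
-- ===== PORT A =====

-- loop body of A's 'for i in range(1, len(tokens))'
def stepA (tokens : List String) (spacings : List String)
    (st : Int × List String) (i : Int) : Int × List String :=
  let e1 : Int := if (PySem.List.pyGet? spacings (i - 1)).getD "" == "yes" then st.1 + 1 else st.1
  let e2 : Int := e1 + PySem.Str.len ((PySem.List.pyGet? tokens i).getD "")
  (e2, st.2 ++ [PySem.Int.toStr e2])

def get_end_positions_py (tokens : List String) (spacings : List String) : List String :=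
  -- 'tokens[0]' raises IndexError on empty tokens; Pre_ excludes that (getD "" is a dummy there)
  let e0 : Int := PySem.Str.len ((PySem.List.pyGet? tokens 0).getD "") - 1
  ((PySem.List.pyRange 1 tokens.length 1).foldl (stepA tokens spacings)
    (e0, [PySem.Int.toStr e0])).2

-- ===== PORT B =====

def get_end_positions_py_alt (tokens : List String) (spacings : List String) : List String :=
  (PySem.List.pyRange 0 tokens.length 1).map (fun i =>
    PySem.Int.toStr
      (((PySem.List.slice tokens none (some (i + 1))).map PySem.Str.len).sum
        + (PySem.List.count (PySem.List.slice spacings none (some i)) "yes" : Int) - 1))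

-- ===== PRECONDITION & SPEC =====
-- Pre_ excludes exactly the inputs where A raises IndexError: empty tokens (tokens[0])
-- or spacings shorter than len(tokens)-1 (spacings[i-1]).
def Pre_get_end_positions_py (tokens : List String) (spacings : List String) : Prop :=
  tokens ≠ [] ∧ tokens.length ≤ spacings.length + 1
instance (tokens : List String) (spacings : List String) : Decidable (Pre_get_end_positions_py tokens spacings) := by unfold Pre_get_end_positions_py; infer_instance

def pvWitness_get_end_positions_py : List String × List String := (["ab", "c"], ["yes"])

def Spec_get_end_positions_py (tokens : List String) (spacings : List String) (out : List String) : Prop := out = get_end_positions_py_alt tokens spacings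
instance (tokens : List String) (spacings : List String) (out : List String) : Decidable (Spec_get_end_positions_py tokens spacings out) := by unfold Spec_get_end_positions_py; infer_instance

-- ===== CLAIM (what is proved, stated in full; the proofs are below) =====
def Claim_equal_get_end_positions_py : Prop := ∀ (tokens : List String) (spacings : List String), Dom_get_end_positions_py tokens spacings → Pre_get_end_positions_py tokens spacings → Spec_get_end_positions_py tokens spacings (get_end_positions_py tokens spacings)

-- ===== LEMMAS AND PROOFS =====

-- per-pair increment and its prefix sum (proof-side characterisation)
def wgt (p : String × String) : Int :=
  PySem.Str.len p.1 + (if p.2 == "yes" then 1 else 0)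

-- reference: run the remaining (token, spacing) pairs with running end e (A's loop shape)
def run : List (String × String) → Int → List String
  | [], _ => []
  | (t, s) :: rest, e =>
      let e2 : Int := (if s == "yes" then e + 1 else e) + PySem.Str.len t
      PySem.Int.toStr e2 :: run rest e2

lemma run_closed (pairs : List (String × String)) (e : Int) :
    run pairs e
      = (List.range pairs.length).map
          (fun j => PySem.Int.toStr (e + ((pairs.take (j + 1)).map wgt).sum)) := by
  induction pairs generalizing e with
  | nil => rfl
  | cons p rest ih =>
    obtain ⟨t, s⟩ := p
    simp only [run, List.length_cons, List.range_succ_eq_map, List.map_cons, List.map_map]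
    congr 1
    · have h1 : (((⟨t, s⟩ :: rest : List (String × String))).take (0 + 1)).map wgt = [wgt ⟨t, s⟩] := by simp
      rw [h1]
      simp only [List.sum_cons, List.sum_nil, add_zero, wgt]
      congr 1
      split <;> ring
    · rw [ih]
      apply List.map_congr_left
      intro j _
      simp only [Function.comp]
      congr 1
      have ht : ((⟨t, s⟩ :: rest : List (String × String))).take (Nat.succ j + 1)
          = ⟨t, s⟩ :: rest.take (j + 1) := by simp [List.take_succ_cons]
      rw [ht]
      simp only [List.map_cons, List.sum_cons, wgt]
      split <;> ring

lemma foldA_run (pairs : List (String × String)) :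
    ∀ (pre_t pre_s extra : List String) (e : Int) (acc : List String),
    1 ≤ pre_t.length →
    pre_s.length = pre_t.length - 1 →
    ((PySem.List.pyRange pre_t.length (pre_t.length + pairs.length) 1).foldl
        (stepA (pre_t ++ pairs.map Prod.fst) (pre_s ++ pairs.map Prod.snd ++ extra))
        (e, acc)).2
      = acc ++ run pairs e := by
  induction pairs with
  | nil =>
    intro pre_t pre_s extra e acc _ _
    simp [PySem.List.pyRange_one_eq_nil, run]
  | cons p rest ih =>
    intro pre_t pre_s extra e acc h1 h2
    obtain ⟨t, s⟩ := p
    have hlt : (pre_t.length : Int) < (pre_t.length : Int) + (((⟨t, s⟩ :: rest : List (String × String))).length : Int) := by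
      simp only [List.length_cons]
      push_cast; omega
    rw [PySem.List.pyRange_one_cons hlt]
    simp only [List.foldl_cons]
    have hsp : (pre_s ++ (⟨t, s⟩ :: rest : List (String × String)).map Prod.snd ++ extra)
        = pre_s ++ (s :: ((rest.map Prod.snd) ++ extra)) := by simp
    have htk : (pre_t ++ (⟨t, s⟩ :: rest : List (String × String)).map Prod.fst)
        = pre_t ++ (t :: rest.map Prod.fst) := by simp
    have hstep : stepA (pre_t ++ (⟨t, s⟩ :: rest : List (String × String)).map Prod.fst)
        (pre_s ++ (⟨t, s⟩ :: rest : List (String × String)).map Prod.snd ++ extra)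
        (e, acc) (pre_t.length : Int)
        = ((if s == "yes" then e + 1 else e) + PySem.Str.len t,
           acc ++ [PySem.Int.toStr ((if s == "yes" then e + 1 else e) + PySem.Str.len t)]) := by
      rw [hsp, htk]
      unfold stepA
      have hidx : (pre_t.length : Int) - 1 = (pre_s.length : Int) := by
        rw [h2]; omega
      rw [hidx, PySem.List.pyGet?_append_length, PySem.List.pyGet?_append_length]
      simp
    rw [hstep]
    have hret := ih (pre_t ++ [t]) (pre_s ++ [s]) extra
      ((if s == "yes" then e + 1 else e) + PySem.Str.len t)
      (acc ++ [PySem.Int.toStr ((if s == "yes" then e + 1 else e) + PySem.Str.len t)])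
      (by simp) (by simp [h2]; omega)
    have hlen : ((pre_t ++ [t]).length : Int) = (pre_t.length : Int) + 1 := by simp
    have harr : (pre_t ++ [t]) ++ rest.map Prod.fst = pre_t ++ (⟨t, s⟩ :: rest : List (String × String)).map Prod.fst := by simp
    have hsarr : (pre_s ++ [s]) ++ rest.map Prod.snd ++ extra
        = pre_s ++ (⟨t, s⟩ :: rest : List (String × String)).map Prod.snd ++ extra := by simp
    rw [hlen, harr, hsarr] at hret
    simp only [List.length_cons] at hret ⊢
    have : ((pre_t.length : Int) + (rest.length + 1 : Nat)) = ((pre_t.length : Int) + 1) + (rest.length : Int) := by push_cast; omega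
    rw [this, hret]
    simp [run]

lemma zip_decompose (l1 l2 : List α) (h : l1.length ≤ l2.length) :
    (l1.zip l2).map Prod.fst = l1 ∧
    l2 = (l1.zip l2).map Prod.snd ++ l2.drop l1.length := by
  induction l1 generalizing l2 with
  | nil => simp
  | cons a l1 ih =>
    cases l2 with
    | nil => simp at h
    | cons b l2 =>
      simp only [List.length_cons, Nat.add_le_add_iff_right] at h
      obtain ⟨h1, h2⟩ := ih l2 h
      refine ⟨by simp [h1], by simpa using h2⟩

-- sum of weights of a zip prefix = sum of token lengths + count of 'yes' in the spacing prefix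
lemma wgt_sum_take (rest spacings : List String) (k : Nat)
    (hk : k ≤ rest.length) (hlen : rest.length ≤ spacings.length) :
    (((rest.zip spacings).take k).map wgt).sum
      = ((rest.take k).map PySem.Str.len).sum + ((spacings.take k).count "yes" : Int) := by
  induction k generalizing rest spacings with
  | zero => simp
  | succ k ih =>
    cases rest with
    | nil => simp at hk
    | cons t rs =>
      cases spacings with
      | nil => simp at hlen
      | cons s ss =>
        simp only [List.zip_cons_cons, List.take_succ_cons, List.map_cons, List.sum_cons,
          List.count_cons]
        have h1 : k ≤ rs.length := by simpa using hk
        have h2 : rs.length ≤ ss.length := by simpa using hlen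
        rw [ih rs ss h1 h2]
        simp only [wgt]
        push_cast
        ring

-- ===== VERDICT (by name: the statement is the Claim_ definition above) =====
set_option maxHeartbeats 1000000 in
theorem get_end_positions_py_spec : Claim_equal_get_end_positions_py := by
  intro tokens spacings _ hpre
  obtain ⟨hne, hlen⟩ := hpre
  obtain ⟨t0, rest, rfl⟩ : ∃ t0 rest, tokens = t0 :: rest := by
    cases tokens with
    | nil => exact absurd rfl hne
    | cons a l => exact ⟨a, l, rfl⟩
  simp only [List.length_cons, Nat.add_le_add_iff_right] at hlen
  unfold Spec_get_end_positions_py get_end_positions_py get_end_positions_py_alt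
  -- A side: reduce the fold to 'toStr e :: run pairs e'
  obtain ⟨hfst, hsnd⟩ := zip_decompose rest spacings hlen
  have hplen : (rest.zip spacings).length = rest.length := by
    simpa using congrArg List.length hfst
  have he0 : (PySem.List.pyGet? (t0 :: rest) 0).getD "" = t0 := by simp
  simp only [he0]
  generalize hprs : rest.zip spacings = prs at hfst hsnd hplen
  have htoks : (t0 :: rest) = [t0] ++ prs.map Prod.fst := by
    simp [hfst]
  have hsps : spacings = [] ++ prs.map Prod.snd ++ spacings.drop rest.length := by
    simpa using hsnd
  have hrange : PySem.List.pyRange 1 ((t0 :: rest).length) 1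
      = PySem.List.pyRange (([t0] : List String).length)
          ((([t0] : List String).length : Int) + (prs.length : Int)) 1 := by
    simp [hplen]
    congr 1
    omega
  conv_lhs => rw [hrange, htoks, hsps]
  rw [foldA_run prs [t0] [] (spacings.drop rest.length)
      (PySem.Str.len t0 - 1) [PySem.Int.toStr (PySem.Str.len t0 - 1)] (by simp) (by simp)]
  rw [run_closed]
  -- B side: pyRange 0 (n+1) → range, slices → take
  rw [PySem.List.pyRange_zero_nat]
  simp only [List.length_cons, List.map_map]
  rw [List.range_succ_eq_map]
  simp only [List.map_cons, List.map_map, List.singleton_append, hplen]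
  refine congrArg₂ List.cons ?_ (List.map_congr_left ?_)
  · -- head: i = 0
    simp only [Function.comp_apply]
    have h1 : ((0 : Nat) : Int) + 1 = ((1 : Nat) : Int) := by norm_num
    rw [h1, PySem.List.slice_to_natCast, PySem.List.slice_to_natCast]
    simp [PySem.List.count]
  · -- tail: i = j + 1
    intro j hj
    have hjlt : j < rest.length := List.mem_range.mp hj
    simp only [Function.comp_apply]
    congr 1
    have hc1 : ((Nat.succ j : Nat) : Int) + 1 = ((j + 2 : Nat) : Int) := by push_cast; ring
    have hc2 : ((Nat.succ j : Nat) : Int) = ((j + 1 : Nat) : Int) := by push_cast; ring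
    rw [hc1, hc2, PySem.List.slice_to_natCast, PySem.List.slice_to_natCast]
    have htake : (t0 :: rest).take (j + 2) = t0 :: rest.take (j + 1) := rfl
    rw [htake, ← hprs]
    simp only [List.map_cons, List.sum_cons, PySem.List.count]
    rw [wgt_sum_take rest spacings (j + 1) (by omega) hlen]
    ring
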